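-- pv_equiv track=rewrite | github.com/tofolo17/MAC0110-files | MAC0110 - IBI5011/Reunião 18/Número alternante (prova).py | alternante
-- ===== SOURCE A (Python) =====
-- def alternante(n):
--     if not n > 0:
--         n = -n
--
--     spar = 0
--     simpar = 0
--
--     i = 1
--     while n != 0:
--         alg = n % 10
--         n = n // 10
--
--         if i % 2 == 0:
--             spar += alg
--         else:
--             simpar += alg
--
--         i += 1
--
--     return spar == simpar
-- ===== SOURCE B (Python) =====
-- def alternante(n):
--     def altsum(m):
--         return 0 if m == 0 else m % 10 - altsum(m // 10)
--     return altsum(abs(n)) == 0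
-- ===== Notes on version B (the rewrite author's own statement) =====
-- stated objective: simpler
-- what changed: Replaces the while-loop with two parity accumulators and a per-digit if/else branch by a single recursive alternating digit sum (d0 - d1 + d2 - ...) compared to zero.
import Mathlib
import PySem

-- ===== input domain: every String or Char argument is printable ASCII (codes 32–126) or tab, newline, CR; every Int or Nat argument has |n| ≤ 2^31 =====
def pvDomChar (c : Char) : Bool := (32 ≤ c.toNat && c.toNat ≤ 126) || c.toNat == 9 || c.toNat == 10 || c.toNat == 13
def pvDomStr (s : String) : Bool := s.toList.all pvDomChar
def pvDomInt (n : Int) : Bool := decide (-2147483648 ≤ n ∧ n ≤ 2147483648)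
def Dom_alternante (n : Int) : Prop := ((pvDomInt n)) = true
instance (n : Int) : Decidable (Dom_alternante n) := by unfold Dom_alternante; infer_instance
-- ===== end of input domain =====

-- B replaces A's two-accumulator while loop and parity branch by one recursive
-- alternating digit sum compared to zero (objective: simpler).

-- ===== PORT A =====
-- A's loop runs with n ≥ 0 (the sign is flipped before the loop), so it is carried
-- as a Nat: on nonnegative values Nat `% 10` / `/ 10` are exactly Python's `% 10` /
-- `// 10`, and `i % 2` on the positive Int i is exactly Python's `i % 2`.
def alternanteLoop (m : Nat) (i spar simpar : Int) : Bool :=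
  if m ≠ 0 then
    -- alg = n % 10; n = n // 10; if i % 2 == 0: spar += alg else: simpar += alg; i += 1
    if i % 2 == 0 then
      alternanteLoop (m / 10) (i + 1) (spar + (m % 10 : Nat)) simpar
    else
      alternanteLoop (m / 10) (i + 1) spar (simpar + (m % 10 : Nat))
  else
    decide (spar = simpar)
  termination_by m
  decreasing_by all_goals exact Nat.div_lt_self (Nat.pos_of_ne_zero (by assumption)) (by omega)

def alternante (n : Int) : Bool :=
  -- if not n > 0: n = -n   (so the loop sees |n|)
  alternanteLoop (if ¬ n > 0 then (-n).toNat else n.toNat) 1 0 0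

-- ===== PORT B =====
-- altsum runs on abs(n) ≥ 0, carried as a Nat (Nat `% 10` / `/ 10` = Python's on nonneg).
def altsum (m : Nat) : Int :=
  if m = 0 then 0 else (m % 10 : Nat) - altsum (m / 10)
  termination_by m
  decreasing_by exact Nat.div_lt_self (Nat.pos_of_ne_zero (by assumption)) (by omega)

def alternante_alt (n : Int) : Bool := decide (altsum n.natAbs = 0)

-- ===== PRECONDITION & SPEC =====
def Spec_alternante (n : Int) (out : Bool) : Prop := out = alternante_alt n
instance (n : Int) (out : Bool) : Decidable (Spec_alternante n out) := by unfold Spec_alternante; infer_instance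

-- ===== CLAIM (what is proved, stated in full; the proofs are below) =====
def Claim_equal_alternante : Prop := ∀ (n : Int), Dom_alternante n → Spec_alternante n (alternante n)

-- ===== LEMMAS AND PROOFS =====

-- Loop invariant: A's loop decides spar - simpar = ±altsum m, the sign given by the parity of i.
theorem alternanteLoop_eq (m : Nat) :
    ∀ (i spar simpar : Int),
      alternanteLoop m i spar simpar
        = decide (spar - simpar = if i % 2 = 1 then altsum m else -altsum m) := by
  induction m using Nat.strong_induction_on with
  | _ m ih =>
    intro i spar simpar
    by_cases hm : m = 0
    · subst hm
      rw [alternanteLoop]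
      simp only [ne_eq, not_true_eq_false, if_false]
      rw [show altsum 0 = 0 from by rw [altsum]; simp]
      by_cases h : i % 2 = 1
      · rw [if_pos h]; apply decide_eq_decide.mpr; omega
      · rw [if_neg h]; apply decide_eq_decide.mpr; omega
    · rw [alternanteLoop, if_pos hm, altsum, if_neg hm]
      have hlt : m / 10 < m := Nat.div_lt_self (Nat.pos_of_ne_zero hm) (by omega)
      by_cases hp : i % 2 = 0
      · rw [if_pos (by simp only [beq_iff_eq]; exact hp), ih _ hlt,
            if_pos (show (i + 1) % 2 = 1 by omega), if_neg (show ¬ i % 2 = 1 by omega)]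
        apply decide_eq_decide.mpr
        constructor <;> intro h <;> omega
      · rw [if_neg (by simp only [beq_iff_eq]; exact hp), ih _ hlt,
            if_neg (show ¬ (i + 1) % 2 = 1 by omega), if_pos (show i % 2 = 1 by omega)]
        apply decide_eq_decide.mpr
        constructor <;> intro h <;> omega

-- ===== VERDICT (by name: the statement is the Claim_ definition above) =====
theorem alternante_spec : Claim_equal_alternante := by
  intro n _
  unfold Spec_alternante alternante alternante_alt
  have habs : (if ¬ n > 0 then (-n).toNat else n.toNat) = n.natAbs := by
    by_cases h : n > 0 <;> simp [h] <;> omega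
  rw [habs, alternanteLoop_eq, if_pos (by norm_num)]
  exact decide_eq_decide.mpr ⟨Eq.symm, Eq.symm⟩
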